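-- pv_equiv track=rewrite | github.com/bhanuprasanna2001/AIlways | backend/app/core/rag/parsing/pdf.py | _merge_empty_header_cols
-- ===== SOURCE A (Python) =====
-- def _join_fragments(parts: list[str]) -> str:
--     """Smart-join cell fragments split across merged columns."""
--     non_empty = [p for p in parts if p.strip()]
--     if not non_empty:
--         return ""
--     result = non_empty[0]
--     for p in non_empty[1:]:
--         if p[0].islower() or (p[0].isdigit() and result[-1:].isdigit()) or result.endswith(("-", "/")):
--             result += p
--         else:
--             result += " " + p
--     return result.strip()
--
-- def _merge_empty_header_cols(
--     headers: list[str], rows: list[list[str]],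
-- ) -> tuple[list[str], list[list[str]]]:
--     """Merge columns whose header is empty into the preceding column."""
--     if len(headers) < 2:
--         return headers, rows
--     groups: list[tuple[str, list[int]]] = []
--     for i, h in enumerate(headers):
--         if h.strip():
--             groups.append((h, [i]))
--         elif groups:
--             groups[-1][1].append(i)
--         else:
--             groups.append((h, [i]))
--     if all(len(g[1]) == 1 for g in groups):
--         return headers, rows
--     new_h = [h for h, _ in groups]
--     new_rows = [
--         [_join_fragments([row[j] if j < len(row) else "" for j in idxs]) for _, idxs in groups]
--         for row in rows
--     ]
--     return new_h, new_rows
-- ===== SOURCE B (Python) =====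
-- def _join_fragments(parts: list[str]) -> str:
--     """Smart-join cell fragments split across merged columns."""
--     non_empty = [p for p in parts if p.strip()]
--     if not non_empty:
--         return ""
--     result = non_empty[0]
--     for p in non_empty[1:]:
--         if p[0].islower() or (p[0].isdigit() and result[-1:].isdigit()) or result.endswith(("-", "/")):
--             result += p
--         else:
--             result += " " + p
--     return result.strip()
--
--
-- def _merge_empty_header_cols(headers, rows):
--     """Merge columns with empty headers into the preceding column, one pass per row."""
--     if len(headers) < 2 or all(h.strip() for h in headers[1:]):
--         return headers, rows
--     new_h = [h for k, h in enumerate(headers) if k == 0 or h.strip()]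
--     new_rows = []
--     for row in rows:
--         out, buf = [], None
--         for k, h in enumerate(headers):
--             cell = row[k] if k < len(row) else ""
--             if k == 0 or h.strip():
--                 if buf is not None:
--                     out.append(_join_fragments(buf))
--                 buf = [cell]
--             else:
--                 buf.append(cell)
--         out.append(_join_fragments(buf))
--         new_rows.append(out)
--     return new_h, new_rows
-- ===== Notes on version B (the rewrite author's own statement) =====
-- stated objective: alternative
-- what changed: B replaces A's two-phase scheme (build (header, index-list) groups by mutating the last group, then gather cells by index per group) with an early check on headers[1:] plus a single buffered left-to-right pass per row that flushes through _join_fragments at each non-empty header; no intermediate index-group structure is built or re-indexed.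
import Mathlib
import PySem

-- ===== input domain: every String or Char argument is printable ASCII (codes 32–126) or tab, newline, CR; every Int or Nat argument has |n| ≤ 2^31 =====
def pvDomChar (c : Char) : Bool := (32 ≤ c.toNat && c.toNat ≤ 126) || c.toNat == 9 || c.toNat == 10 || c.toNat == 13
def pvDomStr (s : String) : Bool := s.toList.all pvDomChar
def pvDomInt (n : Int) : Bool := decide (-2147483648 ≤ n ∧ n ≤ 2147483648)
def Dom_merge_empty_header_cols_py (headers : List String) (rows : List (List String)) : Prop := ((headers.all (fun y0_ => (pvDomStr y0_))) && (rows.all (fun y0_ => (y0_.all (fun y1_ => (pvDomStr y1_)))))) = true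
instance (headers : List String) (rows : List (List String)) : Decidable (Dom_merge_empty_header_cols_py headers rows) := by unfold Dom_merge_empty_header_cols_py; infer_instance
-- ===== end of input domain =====

-- B fuses A's two passes (build index groups, then gather per row) into one left-to-right
-- buffered pass per row; objective: simpler/alternative decomposition, same results.

-- ===== PORT A =====

-- shared helper: Python _join_fragments (used unchanged by A and B)
def joinFragments (parts : List String) : String :=
  let nonEmpty := parts.filter (fun p => PySem.Str.strip p != "")
  match nonEmpty with
  | [] => ""
  | first :: rest =>
    PySem.Str.strip (rest.foldl (fun result p =>
      -- p is non-empty (its strip is non-empty); p[0] ported via pyGet?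
      let c0 := (PySem.Str.pyGet? p 0).getD ' '
      if PySem.Chars.islower c0
          || (PySem.Chars.isdigit c0 && PySem.Str.strIsdigit (PySem.Str.slice result (some (-1)) none))
          || PySem.Str.endswith result "-" || PySem.Str.endswith result "/"
      then result ++ p
      else result ++ " " ++ p) first)

-- shared helper: the Python expression `row[j] if j < len(row) else ""` (j ≥ 0 at every use)
def cellAt (row : List String) (j : Int) : String :=
  if j < (row.length : Int) then row.getD j.toNat "" else ""

-- one iteration of A's group-building loop (groups[-1][1].append = rebuild last element)
def groupsStep (groups : List (String × List Int)) (ih : Int × String) : List (String × List Int) :=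
  if PySem.Str.strip ih.2 != "" then groups ++ [(ih.2, [ih.1])]
  else match groups.getLast? with
    | some g => groups.dropLast ++ [(g.1, g.2 ++ [ih.1])]
    | none => groups ++ [(ih.2, [ih.1])]

def merge_empty_header_cols_py (headers : List String) (rows : List (List String)) : List String × List (List String) :=
  if headers.length < 2 then (headers, rows)
  else
    let groups := (PySem.List.enumerate headers 0).foldl groupsStep []
    if groups.all (fun g => g.2.length == 1) then (headers, rows)
    else
      (groups.map (·.1),
       rows.map (fun row => groups.map (fun g => joinFragments (g.2.map (cellAt row)))))

-- ===== PORT B =====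

-- one iteration of B's buffered row pass (buf is never None in the else branch)
def altStep (row : List String) (st : List String × Option (List String)) (kh : Int × String) : List String × Option (List String) :=
  let cell := cellAt row kh.1
  if kh.1 == 0 || PySem.Str.strip kh.2 != "" then
    ((match st.2 with
      | some buf => st.1 ++ [joinFragments buf]
      | none => st.1), some [cell])
  else (st.1, some (st.2.getD [] ++ [cell]))

def altRow (headers : List String) (row : List String) : List String :=
  let st := (PySem.List.enumerate headers 0).foldl (altStep row) ([], none)
  st.1 ++ [joinFragments (st.2.getD [])]

def merge_empty_header_cols_py_alt (headers : List String) (rows : List (List String)) : List String × List (List String) :=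
  if headers.length < 2
      || (PySem.List.slice headers (some 1) none).all (fun h => PySem.Str.strip h != "") then
    (headers, rows)
  else
    ((PySem.List.enumerate headers 0).filterMap
       (fun kh => if kh.1 == 0 || PySem.Str.strip kh.2 != "" then some kh.2 else none),
     rows.map (altRow headers))

-- ===== PRECONDITION & SPEC =====
def Spec_merge_empty_header_cols_py (headers : List String) (rows : List (List String)) (out : List String × List (List String)) : Prop := out = merge_empty_header_cols_py_alt headers rows
instance (headers : List String) (rows : List (List String)) (out : List String × List (List String)) : Decidable (Spec_merge_empty_header_cols_py headers rows out) := by unfold Spec_merge_empty_header_cols_py; infer_instance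

-- ===== CLAIM (what is proved, stated in full; the proofs are below) =====
def Claim_equal_merge_empty_header_cols_py : Prop := ∀ (headers : List String) (rows : List (List String)), Dom_merge_empty_header_cols_py headers rows → Spec_merge_empty_header_cols_py headers rows (merge_empty_header_cols_py headers rows)

-- ===== LEMMAS AND PROOFS =====

-- closed form of A's grouping loop: `extendG g i hs` is the groups produced after the
-- current open group g, scanning hs with next index i
def extendG (g : String × List Int) (i : Int) : List String → List (String × List Int)
  | [] => [g]
  | h :: t =>
    if PySem.Str.strip h != "" then g :: extendG (h, [i]) (i + 1) t
    else extendG (g.1, g.2 ++ [i]) (i + 1) t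

lemma foldl_groupsStep_extend (hs : List String) : ∀ (i : Int) (acc : List (String × List Int)) (g : String × List Int),
    (PySem.List.enumerate hs i).foldl groupsStep (acc ++ [g]) = acc ++ extendG g i hs := by
  induction hs with
  | nil => intro i acc g; simp [PySem.List.enumerate_nil, extendG]
  | cons h t ih =>
    intro i acc g
    rw [PySem.List.enumerate_cons]
    simp only [List.foldl_cons, extendG]
    by_cases hc : PySem.Str.strip h != ""
    · rw [show groupsStep (acc ++ [g]) (i, h) = (acc ++ [g]) ++ [(h, [i])] by
        simp [groupsStep, hc]]
      rw [ih (i + 1) (acc ++ [g]) (h, [i])]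
      simp [hc]
    · rw [show groupsStep (acc ++ [g]) (i, h) = acc ++ [(g.1, g.2 ++ [i])] by
        simp [groupsStep, hc]]
      rw [ih (i + 1) acc (g.1, g.2 ++ [i])]
      simp [hc]

lemma groups_eq_extend (h0 : String) (hs : List String) :
    (PySem.List.enumerate (h0 :: hs) 0).foldl groupsStep [] = extendG (h0, [0]) 1 hs := by
  rw [PySem.List.enumerate_cons]
  simp only [List.foldl_cons]
  have h1 : groupsStep [] ((0 : Int), h0) = [] ++ [(h0, [(0 : Int)])] := by
    by_cases hc : PySem.Str.strip h0 != "" <;> simp [groupsStep, hc]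
  rw [h1, foldl_groupsStep_extend]
  simp

lemma extend_map_fst (hs : List String) : ∀ (g : String × List Int) (i : Int),
    (extendG g i hs).map (·.1) = g.1 :: hs.filter (fun h => PySem.Str.strip h != "") := by
  induction hs with
  | nil => intro g i; simp [extendG]
  | cons h t ih =>
    intro g i
    by_cases hc : PySem.Str.strip h != "" <;>
      simp [extendG, hc, ih]

lemma extend_all_big (hs : List String) : ∀ (g : String × List Int) (i : Int), 2 ≤ g.2.length →
    (extendG g i hs).all (fun g => g.2.length == 1) = false := by
  induction hs with
  | nil => intro g i hg; simp [extendG]; omega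
  | cons h t ih =>
    intro g i hg
    by_cases hc : PySem.Str.strip h != ""
    · simp [extendG, hc]; intro h'; exact absurd h' (by omega)
    · simp only [extendG, hc, Bool.false_eq_true, if_false]
      exact ih (g.1, g.2 ++ [i]) (i + 1) (by simp; omega)

lemma extend_all_singleton (hs : List String) : ∀ (g : String × List Int) (i : Int), g.2 ≠ [] →
    (extendG g i hs).all (fun g => g.2.length == 1)
      = (g.2.length == 1 && hs.all (fun h => PySem.Str.strip h != "")) := by
  induction hs with
  | nil => intro g i _; simp [extendG]
  | cons h t ih =>
    intro g i hg
    by_cases hc : PySem.Str.strip h != ""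
    · simp [extendG, hc, ih (h, [i]) (i + 1) (by simp)]
    · rw [show extendG g i (h :: t) = extendG (g.1, g.2 ++ [i]) (i + 1) t by
        simp [extendG, hc]]
      have hp : 0 < g.2.length := List.length_pos_iff.mpr hg
      rw [extend_all_big t (g.1, g.2 ++ [i]) (i + 1) (by simp only [List.length_append]; simp; omega)]
      have hstr : PySem.Str.strip h = "" := by simpa using hc
      simp [hstr]

lemma filterMap_enumerate_pos (hs : List String) : ∀ (i : Int), 1 ≤ i →
    (PySem.List.enumerate hs i).filterMap
        (fun kh => if kh.1 == 0 || PySem.Str.strip kh.2 != "" then some kh.2 else none)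
      = hs.filter (fun h => PySem.Str.strip h != "") := by
  induction hs with
  | nil => intro i _; simp [PySem.List.enumerate_nil]
  | cons h t ih =>
    intro i hi
    rw [PySem.List.enumerate_cons]
    by_cases hc : PySem.Str.strip h = ""
    · rw [List.filterMap_cons_none (by simp [hc, show i ≠ 0 by omega]),
        ih (i + 1) (by omega), List.filter_cons_of_neg (by simp [hc])]
    · rw [List.filterMap_cons_some (b := h) (by simp [hc]),
        ih (i + 1) (by omega), List.filter_cons_of_pos (by simp [hc])]

lemma altRow_extend (row : List String) (hs : List String) : ∀ (i : Int), 1 ≤ i →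
    ∀ (out : List String) (g : String × List Int),
    (let st := (PySem.List.enumerate hs i).foldl (altStep row) (out, some (g.2.map (cellAt row)));
     st.1 ++ [joinFragments (st.2.getD [])])
      = out ++ (extendG g i hs).map (fun g => joinFragments (g.2.map (cellAt row))) := by
  induction hs with
  | nil => intro i _ out g; simp [PySem.List.enumerate_nil, extendG]
  | cons h t ih =>
    intro i hi out g
    rw [PySem.List.enumerate_cons]
    have h0 : ((i : Int) == 0) = false := by
      simp only [beq_eq_false_iff_ne]; omega
    simp only [List.foldl_cons]
    by_cases hc : PySem.Str.strip h != ""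
    · rw [show altStep row (out, some (g.2.map (cellAt row))) (i, h)
          = (out ++ [joinFragments (g.2.map (cellAt row))], some ([(i : Int)].map (cellAt row))) by
        simp [altStep, h0, hc]]
      rw [show ([(i : Int)].map (cellAt row)) = ((h, [i]).2.map (cellAt row)) by rfl]
      rw [ih (i + 1) (by omega) (out ++ [joinFragments (g.2.map (cellAt row))]) (h, [i])]
      simp [extendG, hc]
    · rw [show altStep row (out, some (g.2.map (cellAt row))) (i, h)
          = (out, some ((g.1, g.2 ++ [i]).2.map (cellAt row))) by
        simp [altStep, h0, hc, cellAt]]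
      rw [ih (i + 1) (by omega) out (g.1, g.2 ++ [i])]
      simp [extendG, hc]

lemma altRow_eq (h0 : String) (hs : List String) (row : List String) :
    altRow (h0 :: hs) row
      = (extendG (h0, [0]) 1 hs).map (fun g => joinFragments (g.2.map (cellAt row))) := by
  unfold altRow
  rw [PySem.List.enumerate_cons]
  simp only [List.foldl_cons]
  rw [show altStep row ([], none) ((0 : Int), h0)
      = ([], some ((h0, [(0 : Int)]).2.map (cellAt row))) by simp [altStep]]
  have := altRow_extend row hs 1 (by omega) [] (h0, [0])
  simpa using this

-- ===== VERDICT (by name: the statement is the Claim_ definition above) =====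
theorem merge_empty_header_cols_py_spec : Claim_equal_merge_empty_header_cols_py := by
  intro headers rows _
  unfold Spec_merge_empty_header_cols_py merge_empty_header_cols_py merge_empty_header_cols_py_alt
  by_cases hlen : headers.length < 2
  · simp [hlen]
  · match headers, hlen with
    | h0 :: hs, hlen =>
      have hslice : PySem.List.slice (h0 :: hs) (some 1) none = hs := by
        rw [PySem.List.slice_from_one]; rfl
      have hgroups := groups_eq_extend h0 hs
      rw [if_neg hlen]
      simp only [hgroups, hslice]
      by_cases hall : hs.all (fun h => PySem.Str.strip h != "")
      · rw [if_pos (by rw [extend_all_singleton hs (h0, [0]) 1 (by simp)]; simp [hall]),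
            if_pos (by simp [hall])]
      · rw [if_neg (by rw [extend_all_singleton hs (h0, [0]) 1 (by simp)]; simp [hall]),
            if_neg (by simp [hall]; intro h; exact hlen (by simp [h]))]
        refine Prod.ext ?_ ?_
        · show (extendG (h0, [0]) 1 hs).map (·.1) = _
          rw [extend_map_fst, PySem.List.enumerate_cons,
            List.filterMap_cons_some (b := h0) (by simp),
            show (0 : Int) + 1 = 1 by ring,
            filterMap_enumerate_pos hs 1 (by omega)]
        · exact List.map_congr_left (fun row _ => (altRow_eq h0 hs row).symm)
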